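-- pv_equiv track=rewrite | github.com/anjeshkafle/ai-strategies-in-baghchal | backend/utilities/q_table_summarizer.py | analyze_feature_distributions
-- ===== SOURCE A (Python) =====
-- from collections import defaultdict, Counter
--
-- def analyze_feature_distributions(q_table):
--     """Analyze the distribution of features in state tuples"""
--     feature_values = defaultdict(Counter)
--
--     # Feature indices (based on _get_state_features implementations):
--     # 0: goats_captured_bucket
--     # 1: tigers_trapped_bucket
--     # 2: tiger_mobility_bucket
--     # 3: goat_mobility_bucket
--     # 4: captures_bucket
--     # 5: threats_bucket
--     # 6: position_bucket
--     # 7: spacing_bucket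
--     # 8: edge_bucket
--     # 9: closed_bucket
--     # 10: goats_bucket
--     # 11: phase
--
--     feature_names = [
--         "goats_captured", "tigers_trapped", "tiger_mobility",
--         "goat_mobility", "captures", "threats", "position",
--         "spacing", "edge", "closed", "goats", "phase"
--     ]
--
--     for state in q_table.keys():
--         for i, feature in enumerate(state):
--             feature_values[i][feature] += 1
--
--     distributions = {}
--     for i, counter in feature_values.items():
--         distributions[feature_names[i]] = dict(counter)
--
--     return distributions
-- ===== SOURCE B (Python) =====
-- from collections import Counter
--
-- def analyze_feature_distributions(q_table):
--     """Analyze the distribution of features in state tuples (column-major)."""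
--     feature_names = [
--         "goats_captured", "tigers_trapped", "tiger_mobility",
--         "goat_mobility", "captures", "threats", "position",
--         "spacing", "edge", "closed", "goats", "phase"
--     ]
--     states = list(q_table.keys())
--     width = max((len(s) for s in states), default=0)
--     return {
--         feature_names[i]: dict(Counter(s[i] for s in states if len(s) > i))
--         for i in range(width)
--     }
-- ===== Notes on version B (the rewrite author's own statement) =====
-- stated objective: alternative
-- what changed: Replaces A's row-major nested loop that increments a defaultdict-of-Counters per state per feature (then a second pass renaming indices) with a column-major dict comprehension: compute the width once, then count each whole feature column with one Counter per index.
import Mathlib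
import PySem

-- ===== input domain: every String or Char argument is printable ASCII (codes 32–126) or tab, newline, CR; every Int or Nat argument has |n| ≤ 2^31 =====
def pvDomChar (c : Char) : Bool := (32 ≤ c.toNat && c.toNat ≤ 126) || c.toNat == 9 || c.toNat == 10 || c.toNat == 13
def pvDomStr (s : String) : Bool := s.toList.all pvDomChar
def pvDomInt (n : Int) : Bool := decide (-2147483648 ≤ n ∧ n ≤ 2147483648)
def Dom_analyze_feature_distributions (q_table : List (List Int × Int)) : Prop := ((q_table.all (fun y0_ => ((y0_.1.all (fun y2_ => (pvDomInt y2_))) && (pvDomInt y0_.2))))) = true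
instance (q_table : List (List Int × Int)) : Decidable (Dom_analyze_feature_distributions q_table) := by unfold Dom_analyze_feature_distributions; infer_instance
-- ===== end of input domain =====

-- B re-implements A column-major (one Counter per whole feature column) instead of A's
-- row-major nested increment loop; same return value, no speed claim.

-- ===== PORT A =====
def pvNames : List String :=
  ["goats_captured", "tigers_trapped", "tiger_mobility",
   "goat_mobility", "captures", "threats", "position",
   "spacing", "edge", "closed", "goats", "phase"]

-- body of A's inner loop: feature_values[i][feature] += 1 (defaultdict(Counter))
def pvStepI (fv : PySem.Dict Int (PySem.Dict Int Int)) (p : Int × Int) : PySem.Dict Int (PySem.Dict Int Int) :=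
  fv.insert p.1 ((fv.getD p.1 PySem.Dict.empty).insert p.2 ((fv.getD p.1 PySem.Dict.empty).getD p.2 0 + 1))

-- feature_names[i] is indexed with 0 ≤ i < 12 under Pre_ (pyGetD is exact there;
-- the IndexError beyond index 11 is excluded by Pre_).
def analyze_feature_distributions (q_table : List (List Int × Int)) : List (String × List (Int × Int)) :=
  let feature_values : PySem.Dict Int (PySem.Dict Int Int) :=
    (PySem.List.dedup (q_table.map Prod.fst)).foldl
      (fun fv state => (PySem.List.enumerate state 0).foldl pvStepI fv)
      PySem.Dict.empty
  let distributions : PySem.Dict String (List (Int × Int)) :=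
    feature_values.items.foldl
      (fun dist p => dist.insert (PySem.List.pyGetD pvNames p.1 "") p.2.items)
      PySem.Dict.empty
  distributions.items

-- ===== PORT B =====
-- width = max((len(s) for s in states), default=0)
def pvWidth (states : List (List Int)) : Nat :=
  (states.map List.length).foldl max 0

-- the generator (s[i] for s in states if len(s) > i), as a list
def pvColumn (states : List (List Int)) (i : Nat) : List Int :=
  (states.filter (fun s => decide (i < s.length))).map (fun s => PySem.List.pyGetD s (i : Int) 0)

-- dict comprehension over range(width); its keys feature_names[i] are pairwise distinct
-- for width ≤ 12 (Pre_), so it is the literal list of pairs.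
def analyze_feature_distributions_alt (q_table : List (List Int × Int)) : List (String × List (Int × Int)) :=
  let states := PySem.List.dedup (q_table.map Prod.fst)
  let width := pvWidth states
  (List.range width).map (fun (i : Nat) =>
    (PySem.List.pyGetD pvNames (i : Int) "",
     (PySem.Dict.counter (pvColumn states i)).items))

-- ===== PRECONDITION & SPEC =====
-- Pre_ excludes exactly the q_tables with a state of more than 12 features, where A raises
-- IndexError on feature_names[i].
def Pre_analyze_feature_distributions (q_table : List (List Int × Int)) : Prop :=
  ∀ p ∈ q_table, p.1.length ≤ 12

instance (q_table : List (List Int × Int)) : Decidable (Pre_analyze_feature_distributions q_table) := by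
  unfold Pre_analyze_feature_distributions; infer_instance

def pvWitness_analyze_feature_distributions : (List (List Int × Int)) :=
  [([0, 1, 2], 5), ([0, 1, 3], 2), ([0, 1, 2], 4)]

def Spec_analyze_feature_distributions (q_table : List (List Int × Int)) (out : List (String × List (Int × Int))) : Prop := out = analyze_feature_distributions_alt q_table
instance (q_table : List (List Int × Int)) (out : List (String × List (Int × Int))) : Decidable (Spec_analyze_feature_distributions q_table out) := by unfold Spec_analyze_feature_distributions; infer_instance

-- ===== CLAIM (what is proved, stated in full; the proofs are below) =====
def Claim_equal_analyze_feature_distributions : Prop := ∀ (q_table : List (List Int × Int)), Dom_analyze_feature_distributions q_table → Pre_analyze_feature_distributions q_table → Spec_analyze_feature_distributions q_table (analyze_feature_distributions q_table)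

-- ===== LEMMAS AND PROOFS =====

-- one Counter increment, as A performs it
def pvInc (d : PySem.Dict Int Int) (x : Int) : PySem.Dict Int Int :=
  d.insert x (d.getD x 0 + 1)

lemma pv_counter_snoc (xs : List Int) (x : Int) :
    PySem.Dict.counter (xs ++ [x]) = pvInc (PySem.Dict.counter xs) x := by
  rw [← PySem.Dict.foldl_insert_getD_add_one_eq_counter, List.foldl_append,
    PySem.Dict.foldl_insert_getD_add_one_eq_counter]
  rfl

lemma pv_mem_range_cast (W k : Nat) :
    ((k : Int) ∈ (List.range W).map (fun (n : Nat) => (n : Int))) ↔ k < W := by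
  simp

-- A's inner loop over enumerate(state, k) on a dict whose keys are 0..W-1, k ≤ W:
-- keys extend to 0..max(W, k+len)-1 and each counter in the window gets one increment.
lemma pv_inner (s : List Int) : ∀ (k W : Nat) (fv : PySem.Dict Int (PySem.Dict Int Int)),
    k ≤ W → fv.keys = (List.range W).map (fun (n : Nat) => (n : Int)) →
    ((PySem.List.enumerate s (k : Int)).foldl pvStepI fv).keys
        = (List.range (max W (k + s.length))).map (fun (n : Nat) => (n : Int))
    ∧ ∀ (i : Nat), ((PySem.List.enumerate s (k : Int)).foldl pvStepI fv).getD (i : Int) PySem.Dict.empty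
        = if k ≤ i ∧ i < k + s.length
          then pvInc (fv.getD (i : Int) PySem.Dict.empty) (s.getD (i - k) 0)
          else fv.getD (i : Int) PySem.Dict.empty := by
  induction s with
  | nil =>
    intro k W fv hk hkeys
    constructor
    · simpa [PySem.List.enumerate_nil, Nat.max_eq_left hk] using hkeys
    · intro i
      rw [PySem.List.enumerate_nil]
      simp only [List.foldl_nil]
      rw [if_neg (by simp only [List.length_nil]; omega)]
  | cons x t ih =>
    intro k W fv hk hkeys
    have hstep : (PySem.List.enumerate (x :: t) (k : Int)).foldl pvStepI fv
        = (PySem.List.enumerate t ((k + 1 : Nat) : Int)).foldl pvStepI (pvStepI fv ((k : Int), x)) := by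
      rw [PySem.List.enumerate_cons]
      push_cast
      rfl
    have hkeys1 : (pvStepI fv ((k : Int), x)).keys
        = (List.range (max W (k + 1))).map (fun (n : Nat) => (n : Int)) := by
      by_cases hkW : k < W
      · have hc : fv.contains (k : Int) = true := by
          rw [PySem.Dict.contains_eq_decide_mem_keys, hkeys]
          simp [pv_mem_range_cast, hkW]
        rw [pvStepI, PySem.Dict.keys_insert_of_contains _ _ hc, hkeys,
          Nat.max_eq_left (by omega)]
      · have hkeq : k = W := by omega
        have hc : fv.contains (k : Int) = false := by
          rw [PySem.Dict.contains_eq_decide_mem_keys, hkeys]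
          simp [pv_mem_range_cast]
          omega
        subst hkeq
        rw [pvStepI, PySem.Dict.keys_insert_of_not_contains _ _ hc, hkeys,
          Nat.max_eq_right (by omega), List.range_succ, List.map_append]
        rfl
    have hgd1 : ∀ (i : Nat), (pvStepI fv ((k : Int), x)).getD (i : Int) PySem.Dict.empty
        = if i = k then pvInc (fv.getD (k : Int) PySem.Dict.empty) x
          else fv.getD (i : Int) PySem.Dict.empty := by
      intro i
      rw [pvStepI, PySem.Dict.getD_insert]
      by_cases h : i = k
      · simp [h, pvInc]
      · rw [if_neg (by simpa using h), if_neg h]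
    obtain ⟨hK, hG⟩ := ih (k + 1) (max W (k + 1)) (pvStepI fv ((k : Int), x))
      (Nat.le_max_right _ _) hkeys1
    constructor
    · rw [hstep, hK]
      have : max (max W (k + 1)) (k + 1 + t.length) = max W (k + (x :: t).length) := by
        simp only [List.length_cons]; omega
      rw [this]
    · intro i
      simp only [List.length_cons]
      rw [hstep, hG i, hgd1 i]
      by_cases hreg : k ≤ i ∧ i < k + (t.length + 1)
      · by_cases hik : i = k
        · subst hik
          rw [if_neg (by omega : ¬ (i + 1 ≤ i ∧ i < i + 1 + t.length)), if_pos rfl,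
            if_pos hreg, Nat.sub_self, List.getD_cons_zero]
        · have hr : i + 1 ≤ i + 1 := le_refl _
          have hr2 : k + 1 ≤ i ∧ i < k + 1 + t.length := by omega
          rw [if_pos hr2, if_neg hik, if_pos hreg]
          have hi : i - k = (i - (k + 1)) + 1 := by omega
          rw [hi, List.getD_cons_succ]
      · have h1 : ¬ (k + 1 ≤ i ∧ i < k + 1 + t.length) := by omega
        have hik : i ≠ k := by rintro rfl; exact hreg ⟨le_refl _, by omega⟩
        rw [if_neg h1, if_neg hik, if_neg hreg]

lemma pv_width_snoc (ks : List (List Int)) (s : List Int) :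
    pvWidth (ks ++ [s]) = max (pvWidth ks) s.length := by
  simp [pvWidth, List.foldl_append]

lemma pv_column_snoc (ks : List (List Int)) (s : List Int) (i : Nat) :
    pvColumn (ks ++ [s]) i
      = pvColumn ks i ++ (if i < s.length then [PySem.List.pyGetD s (i : Int) 0] else []) := by
  by_cases h : i < s.length <;> simp [pvColumn, List.filter_append, h]

-- A's whole double loop leaves keys 0..width-1 with the column counters.
lemma pv_outer (ks : List (List Int)) :
    (ks.foldl (fun fv state => (PySem.List.enumerate state 0).foldl pvStepI fv) PySem.Dict.empty).keys
        = (List.range (pvWidth ks)).map (fun (n : Nat) => (n : Int))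
    ∧ ∀ (i : Nat),
      (ks.foldl (fun fv state => (PySem.List.enumerate state 0).foldl pvStepI fv) PySem.Dict.empty).getD (i : Int) PySem.Dict.empty
        = PySem.Dict.counter (pvColumn ks i) := by
  induction ks using List.reverseRecOn with
  | nil =>
    constructor
    · simp [pvWidth, PySem.Dict.keys_empty]
    · intro i
      simp only [List.foldl_nil]
      rw [PySem.Dict.getD_empty]
      rfl
  | append_singleton ks s ih =>
    obtain ⟨ihK, ihG⟩ := ih
    have hfold : (ks ++ [s]).foldl (fun fv state => (PySem.List.enumerate state 0).foldl pvStepI fv) PySem.Dict.empty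
        = (PySem.List.enumerate s ((0 : Nat) : Int)).foldl pvStepI
            (ks.foldl (fun fv state => (PySem.List.enumerate state 0).foldl pvStepI fv) PySem.Dict.empty) := by
      simp [List.foldl_append]
    obtain ⟨hK, hG⟩ := pv_inner s 0 (pvWidth ks) _ (Nat.zero_le _) ihK
    constructor
    · rw [hfold, hK, pv_width_snoc]
      congr 2
      omega
    · intro i
      rw [hfold, hG i, ihG i, pv_column_snoc]
      by_cases h : i < s.length
      · rw [if_pos (by omega : 0 ≤ i ∧ i < 0 + s.length), if_pos h, pv_counter_snoc,
          PySem.List.pyGetD_natCast, Nat.sub_zero]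
      · rw [if_neg (by omega), if_neg h, List.append_nil]

lemma pv_foldl_max_le (c : Nat) : ∀ (l : List Nat) (a : Nat), a ≤ c → (∀ x ∈ l, x ≤ c) →
    l.foldl max a ≤ c := by
  intro l
  induction l with
  | nil => intro a ha _; simpa using ha
  | cons x t ih =>
    intro a ha hl
    simp only [List.foldl_cons]
    exact ih _ (by have := hl x (by simp); omega) (fun y hy => hl y (by simp [hy]))

lemma pv_names_nodup (W : Nat) (hW : W ≤ 12) :
    ((List.range W).map (fun (i : Nat) => PySem.List.pyGetD pvNames (i : Int) "")).Nodup := by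
  have h12 : ((List.range 12).map (fun (i : Nat) => PySem.List.pyGetD pvNames (i : Int) "")).Nodup := by
    decide
  have htake : (List.range W).map (fun (i : Nat) => PySem.List.pyGetD pvNames (i : Int) "")
      = ((List.range 12).map (fun (i : Nat) => PySem.List.pyGetD pvNames (i : Int) "")).take W := by
    rw [← List.map_take, List.take_range, Nat.min_eq_left hW]
  rw [htake]
  exact h12.sublist (List.take_sublist _ _)

-- ===== VERDICT (by name: the statement is the Claim_ definition above) =====
theorem analyze_feature_distributions_spec : Claim_equal_analyze_feature_distributions := by
  intro q hdom hpre
  unfold Spec_analyze_feature_distributions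
  unfold analyze_feature_distributions analyze_feature_distributions_alt
  set ks := PySem.List.dedup (q.map Prod.fst) with hks
  obtain ⟨hK, hG⟩ := pv_outer ks
  set fv := ks.foldl (fun fv state => (PySem.List.enumerate state 0).foldl pvStepI fv) PySem.Dict.empty with hfv
  have hW12 : pvWidth ks ≤ 12 := by
    apply pv_foldl_max_le _ _ _ (by omega)
    intro x hx
    simp only [List.mem_map] at hx
    obtain ⟨s, hs, rfl⟩ := hx
    rw [hks, PySem.List.mem_dedup, List.mem_map] at hs
    obtain ⟨p, hp, rfl⟩ := hs
    exact hpre p hp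
  have hnd : fv.keys.Nodup := by
    rw [hK]
    exact List.Nodup.map (fun a b h => by exact_mod_cast h) List.nodup_range
  have hitems : fv.items = (List.range (pvWidth ks)).map
      (fun (i : Nat) => ((i : Int), PySem.Dict.counter (pvColumn ks i))) := by
    rw [PySem.Dict.items_eq_map_keys fv hnd PySem.Dict.empty, hK, List.map_map]
    exact List.map_congr_left (fun i _ => by simp [hG i])
  show (fv.items.foldl (fun dist p => dist.insert (PySem.List.pyGetD pvNames p.1 "") p.2.items) PySem.Dict.empty).items
      = (List.range (pvWidth ks)).map (fun (i : Nat) =>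
          (PySem.List.pyGetD pvNames (i : Int) "", (PySem.Dict.counter (pvColumn ks i)).items))
  rw [hitems]
  have hfresh := PySem.Dict.items_foldl_insert_fresh
      ((List.range (pvWidth ks)).map (fun (i : Nat) => ((i : Int), PySem.Dict.counter (pvColumn ks i))))
      (fun p => PySem.List.pyGetD pvNames p.1 "") (fun p => p.2.items) PySem.Dict.empty
      (fun a _ => PySem.Dict.contains_empty _)
      (by simp only [List.map_map, Function.comp_def]; exact pv_names_nodup _ hW12)
  refine hfresh.trans ?_
  simp only [List.map_map, Function.comp_def]
  rfl
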